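-- pv_equiv track=rewrite | github.com/giuliacencetti/Surrogate_net_generation | ETN.py | get_node_encoding
-- ===== SOURCE A (Python) =====
-- def get_node_encoding(ids_no_ego,nodes_no_ego,length_ETNS):
--
--     node_encoding = dict()
--     for n in ids_no_ego:
--         enc = ''
--         for d in range(length_ETNS):
--             if (str(n)+"_"+str(d) in nodes_no_ego):
--                 enc += '1'
--             else:
--                 enc += '0'
--         node_encoding[n]=enc
--
--     return(node_encoding)
-- ===== SOURCE B (Python) =====
-- def get_node_encoding(ids_no_ego, nodes_no_ego, length_ETNS):
--     rows = {}
--     key2n = {}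
--     for n in ids_no_ego:
--         rows[n] = ['0'] * length_ETNS
--         key2n[str(n)] = n
--     idx2d = {}
--     for d in range(length_ETNS):
--         idx2d[str(d)] = d
--     for s in nodes_no_ego:
--         i = s.rfind('_')
--         if i >= 0:
--             n = key2n.get(s[:i])
--             d = idx2d.get(s[i + 1:])
--             if n is not None and d is not None:
--                 rows[n][d] = '1'
--     return {n: ''.join(r) for n, r in rows.items()}
-- ===== Notes on version B (the rewrite author's own statement) =====
-- stated objective: faster
-- what changed: A tests every (id, index) cell by scanning nodes_no_ego for the key string; B builds an inverted index key->(id,index) once, preallocates all-'0' rows, and makes a single scatter pass over nodes_no_ego, so the inner membership scan disappears.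
import Mathlib
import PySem

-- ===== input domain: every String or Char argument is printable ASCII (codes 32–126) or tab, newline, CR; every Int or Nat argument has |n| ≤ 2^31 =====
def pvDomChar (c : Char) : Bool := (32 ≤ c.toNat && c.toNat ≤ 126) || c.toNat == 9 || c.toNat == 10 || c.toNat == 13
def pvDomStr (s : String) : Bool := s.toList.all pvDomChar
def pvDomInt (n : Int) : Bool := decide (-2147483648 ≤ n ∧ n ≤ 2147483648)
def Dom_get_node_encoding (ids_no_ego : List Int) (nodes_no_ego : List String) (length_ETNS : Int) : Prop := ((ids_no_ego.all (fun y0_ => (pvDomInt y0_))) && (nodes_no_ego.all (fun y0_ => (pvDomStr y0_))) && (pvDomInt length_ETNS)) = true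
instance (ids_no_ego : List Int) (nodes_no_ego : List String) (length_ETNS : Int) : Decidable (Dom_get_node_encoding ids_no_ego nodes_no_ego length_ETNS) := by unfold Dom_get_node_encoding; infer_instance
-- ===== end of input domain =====

-- B replaces A's per-(id,index) scan of nodes_no_ego by an inverted index built once plus a single scatter pass (faster; equal return values).

-- str(n) + "_" + str(d), built by both Pythons; string concatenation ported on the char-list side (exact).
def pvKey (n d : Int) : String := String.ofList (PySem.Int.toChars n ++ '_' :: PySem.Int.toChars d)

-- ===== PORT A =====
def get_node_encoding (ids_no_ego : List Int) (nodes_no_ego : List String) (length_ETNS : Int) : List (Int × String) :=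
  (ids_no_ego.foldl (fun (node_encoding : PySem.Dict Int String) n =>
      let enc := (PySem.List.pyRange 0 length_ETNS 1).foldl
        (fun enc d =>
          if nodes_no_ego.contains (pvKey n d) then
            String.ofList (enc.toList ++ ['1'])   -- enc += '1'
          else
            String.ofList (enc.toList ++ ['0']))  -- enc += '0'
        ""
      node_encoding.insert n enc)
    ⟨[]⟩).items

-- ===== PORT B =====
def get_node_encoding_alt (ids_no_ego : List Int) (nodes_no_ego : List String) (length_ETNS : Int) : List (Int × String) :=
  -- one loop over ids builds rows = {n: ['0']*length_ETNS} and key2n = {str(n): n}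
  let init : PySem.Dict Int (List Char) × PySem.Dict String Int :=
    ids_no_ego.foldl (fun p n =>
        (p.1.insert n (List.replicate length_ETNS.toNat '0'),
         p.2.insert (PySem.Int.toStr n) n))
      (⟨[]⟩, ⟨[]⟩)
  -- idx2d = {str(d): d for d in range(length_ETNS)}
  let idx2d : PySem.Dict String Int :=
    (PySem.List.pyRange 0 length_ETNS 1).foldl
      (fun m d => m.insert (PySem.Int.toStr d) d) ⟨[]⟩
  -- single scatter pass: i = s.rfind('_'); n = key2n.get(s[:i]); d = idx2d.get(s[i+1:])
  let rows := nodes_no_ego.foldl (fun rows s =>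
      let i := PySem.Str.rfind s "_"
      if 0 ≤ i then
        match init.2.get? (String.ofList (PySem.List.slice s.toList none (some i))),
              idx2d.get? (String.ofList (PySem.List.slice s.toList (some (i + 1)) none)) with
        | some n, some d => rows.modify n [] (fun row => row.set d.toNat '1')  -- rows[n][d] = '1'
        | _, _ => rows
      else rows)
    init.1
  -- {n: ''.join(r) for n, r in rows.items()}
  rows.items.map (fun p => (p.1, String.ofList p.2))

-- ===== PRECONDITION & SPEC =====
def Spec_get_node_encoding (ids_no_ego : List Int) (nodes_no_ego : List String) (length_ETNS : Int) (out : List (Int × String)) : Prop := out = get_node_encoding_alt ids_no_ego nodes_no_ego length_ETNS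
instance (ids_no_ego : List Int) (nodes_no_ego : List String) (length_ETNS : Int) (out : List (Int × String)) : Decidable (Spec_get_node_encoding ids_no_ego nodes_no_ego length_ETNS out) := by unfold Spec_get_node_encoding; infer_instance

-- ===== CLAIM (what is proved, stated in full; the proofs are below) =====
def Claim_equal_get_node_encoding : Prop := ∀ (ids_no_ego : List Int) (nodes_no_ego : List String) (length_ETNS : Int), Dom_get_node_encoding ids_no_ego nodes_no_ego length_ETNS → Spec_get_node_encoding ids_no_ego nodes_no_ego length_ETNS (get_node_encoding ids_no_ego nodes_no_ego length_ETNS)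

-- ===== LEMMAS AND PROOFS =====
def pvDigits10 (n : Nat) : List Char :=
  if _h : n < 10 then [Nat.digitChar n]
  else pvDigits10 (n / 10) ++ [Nat.digitChar (n % 10)]
  decreasing_by exact Nat.div_lt_self (by omega) (by omega)

theorem pvToDigitsCore_eq : ∀ (f n : Nat) (acc : List Char), n < f →
    Nat.toDigitsCore 10 f n acc = pvDigits10 n ++ acc := by
  intro f
  induction f with
  | zero => omega
  | succ f ih =>
    intro n acc h
    rw [Nat.toDigitsCore]
    by_cases h10 : n < 10
    · have hz : n / 10 = 0 := Nat.div_eq_of_lt h10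
      simp only [hz]
      rw [pvDigits10]
      simp [h10, Nat.mod_eq_of_lt h10]
    · have hne : n / 10 ≠ 0 := by intro hz; exact h10 (by omega)
      simp only [hne]
      rw [ih (n / 10) _ (by omega)]
      conv_rhs => rw [pvDigits10]
      simp [h10]

theorem pvToDigits_eq (n : Nat) : Nat.toDigits 10 n = pvDigits10 n := by
  have := pvToDigitsCore_eq (n + 1) n [] (by omega)
  simpa [Nat.toDigits] using this

theorem pvDigits10_ne_nil (n : Nat) : pvDigits10 n ≠ [] := by
  rw [pvDigits10]
  split <;> simp

theorem pvDigitChar_digit {m : Nat} (h : m < 10) : '0' ≤ Nat.digitChar m ∧ Nat.digitChar m ≤ '9' := by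
  interval_cases m <;> decide

theorem pvDigits10_digit : ∀ (n : Nat), ∀ c ∈ pvDigits10 n, '0' ≤ c ∧ c ≤ '9' := by
  intro n
  induction n using Nat.strong_induction_on with
  | _ n ih =>
    intro c hc
    rw [pvDigits10] at hc
    split at hc
    · next h => simp at hc; subst hc; exact pvDigitChar_digit h
    · next h =>
      rcases List.mem_append.mp hc with h1 | h1
      · exact ih (n / 10) (Nat.div_lt_self (by omega) (by omega)) c h1
      · simp at h1; subst h1; exact pvDigitChar_digit (Nat.mod_lt _ (by omega))

theorem pvDigitChar_inj {a b : Nat} (ha : a < 10) (hb : b < 10)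
    (h : Nat.digitChar a = Nat.digitChar b) : a = b := by
  interval_cases a <;> interval_cases b <;> first | rfl | (exfalso; revert h; decide)

theorem pvDigits10_inj : ∀ (m n : Nat), pvDigits10 m = pvDigits10 n → m = n := by
  intro m
  induction m using Nat.strong_induction_on with
  | _ m ih =>
    intro n h
    conv at h => lhs; rw [pvDigits10]
    conv at h => rhs; rw [pvDigits10]
    split at h <;> split at h
    · next hm hn =>
      simp only [List.cons.injEq] at h
      exact pvDigitChar_inj hm hn h.1
    · next hm hn =>
      exfalso
      have hlen := congrArg List.length h
      have hpos : 0 < (pvDigits10 (n / 10)).length :=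
        List.length_pos_iff.mpr (pvDigits10_ne_nil (n / 10))
      simp only [List.length_append, List.length_cons, List.length_nil] at hlen
      omega
    · next hm hn =>
      exfalso
      have hlen := congrArg List.length h
      have hpos : 0 < (pvDigits10 (m / 10)).length :=
        List.length_pos_iff.mpr (pvDigits10_ne_nil (m / 10))
      simp only [List.length_append, List.length_cons, List.length_nil] at hlen
      omega
    · next hm hn =>
      have h' := List.append_inj h (by
        have := congrArg List.length h
        simp at this
        omega)
      obtain ⟨h1, h2⟩ := h'
      have hdiv := ih (m / 10) (Nat.div_lt_self (by omega) (by omega)) (n / 10) h1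
      simp only [List.cons.injEq] at h2
      have hmod := pvDigitChar_inj (Nat.mod_lt _ (by omega)) (Nat.mod_lt _ (by omega)) h2.1
      omega

theorem pvToChars_eq (n : Int) :
    PySem.Int.toChars n = if n < 0 then '-' :: pvDigits10 n.natAbs else pvDigits10 n.toNat := by
  simp [PySem.Int.toChars, pvToDigits_eq]

theorem pvDash_not_mem (n : Nat) : '-' ∉ pvDigits10 n := by
  intro h
  have := pvDigits10_digit n _ h
  revert this; decide

theorem pvUnderscore_not_mem (n : Nat) : '_' ∉ pvDigits10 n := by
  intro h
  have := pvDigits10_digit n _ h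
  revert this; decide

theorem pvToChars_inj {m n : Int} (h : PySem.Int.toChars m = PySem.Int.toChars n) : m = n := by
  rw [pvToChars_eq, pvToChars_eq] at h
  split_ifs at h with h1 h2 h2
  · simp only [List.cons.injEq] at h
    have := pvDigits10_inj _ _ h.2
    omega
  · exfalso
    exact pvDash_not_mem n.toNat (h ▸ List.mem_cons_self)
  · exfalso
    exact pvDash_not_mem m.toNat (h ▸ List.mem_cons_self)
  · have := pvDigits10_inj _ _ h
    omega

theorem pvUnderscore_not_mem_toChars_nonneg {d : Int} (hd : 0 ≤ d) : '_' ∉ PySem.Int.toChars d := by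
  rw [pvToChars_eq, if_neg (by omega)]
  exact pvUnderscore_not_mem d.toNat

theorem pvSplitFirst : ∀ (u u' v v' : List Char), '_' ∉ u → '_' ∉ u' →
    u ++ '_' :: v = u' ++ '_' :: v' → u = u' ∧ v = v' := by
  intro u
  induction u with
  | nil =>
    intro u' v v' _ hu' h
    cases u' with
    | nil => simp at h; simp [h]
    | cons c u'' =>
      exfalso
      simp at h
      exact hu' (h.1 ▸ List.mem_cons_self)
  | cons c u ih =>
    intro u' v v' hu hu' h
    cases u' with
    | nil =>
      exfalso
      simp at h
      exact hu (h.1 ▸ List.mem_cons_self)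
    | cons c' u'' =>
      simp only [List.cons_append, List.cons.injEq] at h
      have := ih u'' v v' (fun hm => hu (List.mem_cons_of_mem _ hm))
        (fun hm => hu' (List.mem_cons_of_mem _ hm)) h.2
      exact ⟨by simp [h.1, this.1], this.2⟩

theorem pvSplitLast : ∀ (a a' b b' : List Char), '_' ∉ b → '_' ∉ b' →
    a ++ '_' :: b = a' ++ '_' :: b' → a = a' ∧ b = b' := by
  intro a a' b b' hb hb' h
  have hrev : b.reverse ++ '_' :: a.reverse = b'.reverse ++ '_' :: a'.reverse := by
    have := congrArg List.reverse h
    simpa [List.reverse_append] using this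
  have := pvSplitFirst _ _ _ _ (by simpa using hb) (by simpa using hb') hrev
  constructor
  · have := this.2; simpa using congrArg List.reverse this
  · have := this.1; simpa using congrArg List.reverse this

theorem pvKey_inj {n n' d d' : Int} (hd : 0 ≤ d) (hd' : 0 ≤ d')
    (h : pvKey n d = pvKey n' d') : n = n' ∧ d = d' := by
  have h' : PySem.Int.toChars n ++ '_' :: PySem.Int.toChars d
      = PySem.Int.toChars n' ++ '_' :: PySem.Int.toChars d' := by
    have := congrArg String.toList h
    simpa [pvKey, String.toList_ofList] using this
  have := pvSplitLast _ _ _ _ (pvUnderscore_not_mem_toChars_nonneg hd)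
    (pvUnderscore_not_mem_toChars_nonneg hd') h'
  exact ⟨pvToChars_inj this.1, pvToChars_inj this.2⟩

theorem pvToStr_inj {m n : Int} (h : PySem.Int.toStr m = PySem.Int.toStr n) : m = n := by
  apply pvToChars_inj
  rw [← PySem.Int.toList_toStr, ← PySem.Int.toList_toStr, h]

-- an index dict built by inserting each element under its string key
theorem pvIdxSound (g : Int → String) :
    ∀ (xs : List Int) (s : String) (v : Int),
    (xs.foldl (fun c x => c.insert (g x) x) (⟨[]⟩ : PySem.Dict String Int)).get? s = some v →
    s = g v ∧ v ∈ xs := by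
  intro xs
  induction xs using List.reverseRecOn with
  | nil => intro s v h; simp [PySem.Dict.get?] at h
  | append_singleton l x ih =>
    intro s v h
    rw [List.foldl_append] at h
    simp only [List.foldl_cons, List.foldl_nil] at h
    by_cases hs : s = g x
    · rw [hs, PySem.Dict.get?_insert_self] at h
      cases h
      exact ⟨hs, by simp⟩
    · rw [PySem.Dict.get?_insert_of_ne _ _ hs] at h
      have := ih s v h
      exact ⟨this.1, by simp [this.2]⟩

theorem pvIdxComplete (g : Int → String) (hg : ∀ a b : Int, g a = g b → a = b) :
    ∀ (xs : List Int) (v : Int), v ∈ xs →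
    (xs.foldl (fun c x => c.insert (g x) x) (⟨[]⟩ : PySem.Dict String Int)).get? (g v) = some v := by
  intro xs
  induction xs using List.reverseRecOn with
  | nil => intro v h; simp at h
  | append_singleton l x ih =>
    intro v h
    rw [List.foldl_append]
    simp only [List.foldl_cons, List.foldl_nil]
    rcases List.mem_append.mp h with h1 | h1
    · by_cases hk : g v = g x
      · have : v = x := hg _ _ hk
        rw [hk, PySem.Dict.get?_insert_self, this]
      · rw [PySem.Dict.get?_insert_of_ne _ _ hk]
        exact ih v h1
    · simp at h1
      rw [h1, PySem.Dict.get?_insert_self]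


theorem pvRfindGo_eq (a b : List Char) (hb : '_' ∉ b) :
    ∀ i, a.length ≤ i → i ≤ a.length + 1 + b.length →
      PySem.Chars.rfind.go (a ++ '_' :: b) ['_'] i = a.length := by
  intro i
  induction i with
  | zero =>
    intro h1 _
    have ha : a = [] := List.eq_nil_of_length_eq_zero (by omega)
    subst ha
    rw [PySem.Chars.rfind.go]
    simp
  | succ j ih =>
    intro h1 h2
    rw [PySem.Chars.rfind.go]
    by_cases he : a.length = j + 1
    · have : (a ++ '_' :: b).drop (j + 1) = '_' :: b := by
        rw [← he]
        simp
      rw [this]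
      simp [he]
    · have hlt : a.length ≤ j := by omega
      have hdrop : (a ++ '_' :: b).drop (j + 1) = b.drop (j - a.length) := by
        rw [List.drop_append]
        simp only [List.drop_of_length_le (by omega : a.length ≤ j + 1), List.nil_append]
        have : j + 1 - a.length = (j - a.length) + 1 := by omega
        rw [this]
        simp
      have hpref : (['_'].isPrefixOf ((a ++ '_' :: b).drop (j + 1))) = false := by
        rw [hdrop]
        by_contra hcon
        simp only [Bool.not_eq_false] at hcon
        have := List.IsPrefix.mem List.mem_cons_self (List.isPrefixOf_iff_prefix.mp hcon)
        exact hb ((List.drop_subset _ _) this)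
      rw [hpref]
      simp only [Bool.false_eq_true, if_false]
      exact ih hlt (by omega)

theorem pvRfind_eq (a b : List Char) (hb : '_' ∉ b) :
    PySem.Chars.rfind (a ++ '_' :: b) ['_'] = a.length := by
  rw [PySem.Chars.rfind]
  apply pvRfindGo_eq a b hb
  · simp
  · simp; omega

theorem pvRfindGo_sound (s : List Char) :
    ∀ (i : Nat) (r : Int), PySem.Chars.rfind.go s ['_'] i = r → 0 ≤ r →
      ['_'].isPrefixOf (s.drop r.toNat) = true := by
  intro i
  induction i with
  | zero =>
    intro r h hr
    rw [PySem.Chars.rfind.go] at h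
    split at h
    · next hp => rw [← h]; simpa using hp
    · omega
  | succ j ih =>
    intro r h hr
    rw [PySem.Chars.rfind.go] at h
    split at h
    · next hp => rw [← h]; simpa using hp
    · exact ih r h hr

theorem pvRfindSound (s : List Char) (h : 0 ≤ PySem.Chars.rfind s ['_']) :
    s = s.take (PySem.Chars.rfind s ['_']).toNat
        ++ '_' :: s.drop ((PySem.Chars.rfind s ['_']).toNat + 1) := by
  have hp := pvRfindGo_sound s s.length _ rfl h
  set k := (PySem.Chars.rfind s ['_']).toNat with hk
  have hpre := List.isPrefixOf_iff_prefix.mp hp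
  rcases hpre with ⟨t, ht⟩
  have hdrop : s.drop k = '_' :: t := by simpa using ht.symm
  have hklen : k < s.length := by
    by_contra hcon
    rw [List.drop_of_length_le (by omega)] at hdrop
    cases hdrop
  calc s = s.take k ++ s.drop k := (List.take_append_drop k s).symm
    _ = s.take k ++ '_' :: s.drop (k + 1) := by
        rw [hdrop]
        have h2 : List.drop 1 (List.drop k s) = List.drop (k + 1) s := by
          rw [List.drop_drop]
        rw [hdrop] at h2
        simp at h2
        rw [h2]

theorem pvSetMapRange {len d0 : Int} (g : Int → Char) (c : Char) (h0 : 0 ≤ d0) (_h1 : d0 < len) :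
    ((PySem.List.pyRange 0 len 1).map g).set d0.toNat c
      = (PySem.List.pyRange 0 len 1).map (fun d => if d = d0 then c else g d) := by
  apply List.ext_getElem
  · simp
  · intro i hi hi'
    simp only [List.getElem_set, List.getElem_map, PySem.List.getElem_pyRange_one]
    have hiff : (0:Int) + (i:Int) = d0 ↔ d0.toNat = i := by omega
    by_cases hid : d0.toNat = i
    · simp [hid, hiff.mpr hid]
    · rw [if_neg hid, if_neg (fun hc => hid (hiff.mp hc))]

-- the bit row of id n over processed entries ys
def pvRow (len : Int) (ys : List String) (n : Int) : List Char :=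
  (PySem.List.pyRange 0 len 1).map (fun d => if pvKey n d ∈ ys then '1' else '0')
theorem pvEncFold (nodes : List String) (n : Int) :
    ∀ (r : List Int) (e : String),
    r.foldl (fun enc d =>
        if nodes.contains (pvKey n d) then String.ofList (enc.toList ++ ['1'])
        else String.ofList (enc.toList ++ ['0'])) e
      = String.ofList (e.toList ++ r.map (fun d => if pvKey n d ∈ nodes then '1' else '0')) := by
  intro r
  induction r with
  | nil => intro e; simp [String.ofList_toList]
  | cons d r ih =>
    intro e
    simp only [List.foldl_cons, List.map_cons]
    rw [ih]
    by_cases h : pvKey n d ∈ nodes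
    · simp [h]
    · simp [h]

theorem pvGetFoldlInsertFn {γ : Type} (f : Int → γ) :
    ∀ (ids : List Int) (d : PySem.Dict Int γ) (k : Int),
    (ids.foldl (fun a n => a.insert n (f n)) d).get? k
      = if k ∈ ids then some (f k) else d.get? k := by
  intro ids
  induction ids using List.reverseRecOn with
  | nil => intro d k; simp
  | append_singleton l n ih =>
    intro d k
    rw [List.foldl_append]
    simp only [List.foldl_cons, List.foldl_nil]
    by_cases hk : k = n
    · subst hk
      rw [PySem.Dict.get?_insert_self]
      simp
    · rw [PySem.Dict.get?_insert_of_ne _ _ hk, ih]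
      by_cases hl : k ∈ l <;> simp [hl, hk]

def pvKey2n (ids : List Int) : PySem.Dict String Int :=
  ids.foldl (fun c n => c.insert (PySem.Int.toStr n) n) ⟨[]⟩

def pvIdx2d (len : Int) : PySem.Dict String Int :=
  (PySem.List.pyRange 0 len 1).foldl (fun m d => m.insert (PySem.Int.toStr d) d) ⟨[]⟩

def pvStep (ids : List Int) (len : Int) (rows : PySem.Dict Int (List Char)) (s : String) :
    PySem.Dict Int (List Char) :=
  let i := PySem.Str.rfind s "_"
  if 0 ≤ i then
    match (pvKey2n ids).get? (String.ofList (PySem.List.slice s.toList none (some i))),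
          (pvIdx2d len).get? (String.ofList (PySem.List.slice s.toList (some (i + 1)) none)) with
    | some n, some d => rows.modify n [] (fun row => row.set d.toNat '1')
    | _, _ => rows
  else rows

theorem pvOfListToStr (n : Int) : String.ofList (PySem.Int.toChars n) = PySem.Int.toStr n := by
  rw [← PySem.Int.toList_toStr, String.ofList_toList]

theorem pvUnderscoreToList : ("_" : String).toList = ['_'] := by decide

theorem pvStepMatch (ids : List Int) (len : Int) (rows : PySem.Dict Int (List Char))
    (n d : Int) (hn : n ∈ ids) (hd0 : 0 ≤ d) (hdl : d < len) :
    pvStep ids len rows (pvKey n d) = rows.modify n [] (fun row => row.set d.toNat '1') := by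
  have htl : (pvKey n d).toList = PySem.Int.toChars n ++ '_' :: PySem.Int.toChars d := by
    simp [pvKey, String.toList_ofList]
  have hrf : PySem.Str.rfind (pvKey n d) "_" = ((PySem.Int.toChars n).length : Int) := by
    rw [PySem.Str.rfind_eq, htl, pvUnderscoreToList,
      pvRfind_eq _ _ (pvUnderscore_not_mem_toChars_nonneg hd0)]
  unfold pvStep
  rw [hrf, if_pos (by positivity)]
  have hleft : PySem.List.slice (pvKey n d).toList none (some ((PySem.Int.toChars n).length : Int))
      = PySem.Int.toChars n := by
    rw [PySem.List.slice_to _ (by positivity), htl]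
    simp
  have hright : PySem.List.slice (pvKey n d).toList
      (some (((PySem.Int.toChars n).length : Int) + 1)) none = PySem.Int.toChars d := by
    rw [PySem.List.slice_from _ (by positivity), htl]
    have : (((PySem.Int.toChars n).length : Int) + 1).toNat = (PySem.Int.toChars n).length + 1 := by
      omega
    rw [this]
    have : (PySem.Int.toChars n ++ '_' :: PySem.Int.toChars d).drop ((PySem.Int.toChars n).length + 1)
        = ('_' :: PySem.Int.toChars d).drop 1 := by
      rw [List.drop_append]
      simp
    simpa using this
  rw [hleft, hright, pvOfListToStr, pvOfListToStr]
  rw [show (pvKey2n ids).get? (PySem.Int.toStr n) = some n from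
    pvIdxComplete PySem.Int.toStr (fun _ _ h => pvToStr_inj h) ids n hn]
  rw [show (pvIdx2d len).get? (PySem.Int.toStr d) = some d from
    pvIdxComplete PySem.Int.toStr (fun _ _ h => pvToStr_inj h) _ d
      (PySem.List.mem_pyRange_one.mpr ⟨hd0, hdl⟩)]

theorem pvStepNoMatch (ids : List Int) (len : Int) (rows : PySem.Dict Int (List Char))
    (s : String) (h : ∀ n d : Int, n ∈ ids → 0 ≤ d → d < len → s ≠ pvKey n d) :
    pvStep ids len rows s = rows := by
  unfold pvStep
  by_cases hi : 0 ≤ PySem.Str.rfind s "_"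
  · rw [if_pos hi]
    rcases h1 : (pvKey2n ids).get? (String.ofList (PySem.List.slice s.toList none (some (PySem.Str.rfind s "_")))) with _ | n
    · rfl
    rcases h2 : (pvIdx2d len).get? (String.ofList (PySem.List.slice s.toList (some (PySem.Str.rfind s "_" + 1)) none)) with _ | d
    · rfl
    exfalso
    obtain ⟨hleft, hnids⟩ := pvIdxSound PySem.Int.toStr ids _ n h1
    obtain ⟨hright, hdrange⟩ := pvIdxSound PySem.Int.toStr _ _ d h2
    obtain ⟨hd0, hdl⟩ := PySem.List.mem_pyRange_one.mp hdrange
    have hi' : 0 ≤ PySem.Chars.rfind s.toList ['_'] := by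
      rw [← pvUnderscoreToList, ← PySem.Str.rfind_eq]
      exact hi
    have hsplit := pvRfindSound s.toList hi'
    have hrfeq : PySem.Str.rfind s "_" = PySem.Chars.rfind s.toList ['_'] := by
      rw [PySem.Str.rfind_eq, pvUnderscoreToList]
    have hleft' : PySem.Int.toChars n = s.toList.take (PySem.Chars.rfind s.toList ['_']).toNat := by
      have := congrArg String.toList hleft
      rw [hrfeq, PySem.List.slice_to _ hi'] at this
      rw [PySem.Int.toList_toStr] at this
      rw [← this, String.toList_ofList]
    have hright' : PySem.Int.toChars d
        = s.toList.drop ((PySem.Chars.rfind s.toList ['_']).toNat + 1) := by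
      have := congrArg String.toList hright
      rw [hrfeq, PySem.List.slice_from _ (by omega)] at this
      rw [PySem.Int.toList_toStr] at this
      rw [← this, String.toList_ofList]
      congr 1
      omega
    apply h n d hnids hd0 hdl
    have hs' : s = String.ofList s.toList := String.ofList_toList.symm
    rw [hs']
    conv_lhs => rw [hsplit]
    rw [pvKey, ← hleft', ← hright']
  · rw [if_neg hi]

-- keys of an insert at an existing key
theorem pvKeysInsertMem {γ : Type} (d : PySem.Dict Int γ) (k : Int) (v : γ)
    (hk : k ∈ d.keys) : (d.insert k v).keys = d.keys := by
  have h : (List.foldl (fun (a : PySem.Dict Int γ) (x : Int) => a.insert x ((fun _ _ => v) a x)) d [k]).keys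
      = PySem.Set.update d.keys [k] := PySem.Dict.keys_foldl_insert [k] (fun _ _ => v) d
  simp only [List.foldl_cons, List.foldl_nil] at h
  rw [h]
  simp [PySem.Set.update, PySem.Set.add, hk]

theorem pvRowAppendEq (len : Int) (k : Int) (s : String) (ps : List String)
    (h : ∀ d : Int, 0 ≤ d → d < len → pvKey k d ≠ s) :
    pvRow len (ps ++ [s]) k = pvRow len ps k := by
  apply List.map_congr_left
  intro d hd
  have hd' := PySem.List.mem_pyRange_one.mp hd
  have : (pvKey k d ∈ ps ++ [s]) ↔ pvKey k d ∈ ps := by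
    simp only [List.mem_append, List.mem_singleton]
    exact ⟨fun hc => hc.elim id (fun he => absurd he (h d hd'.1 hd'.2)), Or.inl⟩
  simp only [this]

theorem pvScatterInv (ids : List Int) (len : Int) :
    ∀ (ys ps : List String) (rs : PySem.Dict Int (List Char)),
    rs.keys = PySem.Set.update ([] : List Int) ids →
    (∀ k ∈ ids, rs.getD k [] = pvRow len ps k) →
    ((ys.foldl (pvStep ids len) rs).keys = PySem.Set.update ([] : List Int) ids
     ∧ ∀ k ∈ ids, (ys.foldl (pvStep ids len) rs).getD k [] = pvRow len (ps ++ ys) k) := by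
  intro ys
  induction ys with
  | nil =>
    intro ps rs hkeys hrow
    simpa using ⟨hkeys, hrow⟩
  | cons s ys ih =>
    intro ps rs hkeys hrow
    simp only [List.foldl_cons]
    by_cases hm : ∃ n d : Int, n ∈ ids ∧ 0 ≤ d ∧ d < len ∧ s = pvKey n d
    · obtain ⟨n0, d0, hn0, hd0, hd0l, hs⟩ := hm
      rw [hs, pvStepMatch ids len rs n0 d0 hn0 hd0 hd0l]
      have hn0k : n0 ∈ rs.keys := by
        rw [hkeys]
        exact (PySem.Set.mem_update _ _ _).mpr (Or.inr hn0)
      have hkeys' : (rs.modify n0 [] (fun row => row.set d0.toNat '1')).keys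
          = PySem.Set.update ([] : List Int) ids := by
        rw [PySem.Dict.keys_modify, pvKeysInsertMem _ _ _ hn0k, hkeys]
      have hrow' : ∀ k ∈ ids, (rs.modify n0 [] (fun row => row.set d0.toNat '1')).getD k []
          = pvRow len (ps ++ [s]) k := by
        intro k hk
        rw [PySem.Dict.getD_modify]
        by_cases hkn : k = n0
        · subst hkn
          rw [if_pos rfl, hrow k hk]
          unfold pvRow
          rw [pvSetMapRange _ _ hd0, ]
          · apply List.map_congr_left
            intro d hd
            have hdr := PySem.List.mem_pyRange_one.mp hd
            by_cases hdd : d = d0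
            · subst hdd
              simp [hs]
            · rw [if_neg hdd]
              have : (pvKey k d ∈ ps ++ [s]) ↔ pvKey k d ∈ ps := by
                simp only [List.mem_append, List.mem_singleton]
                refine ⟨fun hcc => hcc.elim id (fun he => ?_), Or.inl⟩
                exfalso
                rw [hs] at he
                exact hdd (pvKey_inj hdr.1 hd0 he).2
              simp only [this]
          · exact hd0l
        · rw [if_neg hkn, hrow k hk]
          rw [← pvRowAppendEq len k s ps]
          intro d h0 h1 he
          rw [hs] at he
          exact hkn (pvKey_inj h0 hd0 he).1
      have := ih (ps ++ [s]) _ hkeys' hrow'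
      rw [hs] at this
      simpa [List.append_assoc] using this
    · push Not at hm
      have hnot : ∀ n d : Int, n ∈ ids → 0 ≤ d → d < len → s ≠ pvKey n d := by
        intro n d hn h0 h1 he
        exact (hm n d hn h0 h1) he
      rw [pvStepNoMatch ids len rs s hnot]
      have := ih (ps ++ [s]) rs hkeys (by
        intro k hk
        rw [hrow k hk, ← pvRowAppendEq len k s ps (fun d h0 h1 he => hnot k d hk h0 h1 he.symm)]
        )
      simpa [List.append_assoc] using this

theorem pvFoldlInsertKeys {γ : Type} (f : Int → γ) (ids : List Int) :
    (ids.foldl (fun a n => a.insert n (f n)) (⟨[]⟩ : PySem.Dict Int γ)).keys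
      = PySem.Set.update ([] : List Int) ids :=
  PySem.Dict.keys_foldl_insert ids (fun _ n => f n) ⟨[]⟩

theorem pvFoldlInsertNodup {γ : Type} (f : Int → γ) (ids : List Int) :
    (ids.foldl (fun a n => a.insert n (f n)) (⟨[]⟩ : PySem.Dict Int γ)).keys.Nodup :=
  PySem.Dict.nodup_keys_foldl_insert ids (fun _ n => f n) ⟨[]⟩ (by simp [PySem.Dict.keys])

theorem pvUpdateNodup (ids : List Int) : (PySem.Set.update ([] : List Int) ids).Nodup := by
  have := pvFoldlInsertNodup (fun _ => (0 : Int)) ids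
  rwa [pvFoldlInsertKeys] at this

theorem pvMemUpdate {ids : List Int} {k : Int} :
    k ∈ PySem.Set.update ([] : List Int) ids ↔ k ∈ ids := by
  rw [PySem.Set.mem_update]
  simp

theorem pvFoldlInsertItems {γ : Type} (f : Int → γ) (dflt : γ) (ids : List Int) :
    (ids.foldl (fun a n => a.insert n (f n)) (⟨[]⟩ : PySem.Dict Int γ)).items
      = (PySem.Set.update ([] : List Int) ids).map (fun n => (n, f n)) := by
  rw [PySem.Dict.items_eq_map_keys _ (pvFoldlInsertNodup f ids) dflt, pvFoldlInsertKeys]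
  apply List.map_congr_left
  intro k hk
  rw [PySem.Dict.getD_eq_get?_getD, pvGetFoldlInsertFn f ids ⟨[]⟩ k, if_pos (pvMemUpdate.mp hk)]
  rfl

theorem pvRowNil (len : Int) (k : Int) : pvRow len [] k = List.replicate len.toNat '0' := by
  unfold pvRow
  simp [List.map_const', PySem.List.length_pyRange_one]

theorem pvAltEq (ids : List Int) (nodes : List String) (len : Int) :
    get_node_encoding_alt ids nodes len
      = (nodes.foldl (pvStep ids len)
          (ids.foldl (fun (a : PySem.Dict Int (List Char)) n =>
            a.insert n (List.replicate len.toNat '0')) ⟨[]⟩)).items.map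
          (fun p => (p.1, String.ofList p.2)) := by
  unfold get_node_encoding_alt
  rw [PySem.List.foldl_prod_mk
    (fun (a : PySem.Dict Int (List Char)) n => a.insert n (List.replicate len.toNat '0'))
    (fun (c : PySem.Dict String Int) n => c.insert (PySem.Int.toStr n) n) ids ⟨[]⟩ ⟨[]⟩]
  rfl

theorem pvMain (ids : List Int) (nodes : List String) (len : Int) :
    get_node_encoding ids nodes len = get_node_encoding_alt ids nodes len := by
  -- A side
  have hA : get_node_encoding ids nodes len
      = (PySem.Set.update ([] : List Int) ids).map
          (fun n => (n, String.ofList (pvRow len nodes n))) := by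
    unfold get_node_encoding
    have : (fun (node_encoding : PySem.Dict Int String) n =>
        let enc := (PySem.List.pyRange 0 len 1).foldl
          (fun enc d =>
            if nodes.contains (pvKey n d) then String.ofList (enc.toList ++ ['1'])
            else String.ofList (enc.toList ++ ['0'])) ""
        node_encoding.insert n enc)
        = (fun (a : PySem.Dict Int String) n =>
            a.insert n (String.ofList (pvRow len nodes n))) := by
      funext a n
      simp only [pvEncFold nodes n]
      rfl
    rw [this, pvFoldlInsertItems _ ""]
  -- B side
  have hB : get_node_encoding_alt ids nodes len
      = (PySem.Set.update ([] : List Int) ids).map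
          (fun n => (n, String.ofList (pvRow len nodes n))) := by
    rw [pvAltEq]
    have hrows0keys := pvFoldlInsertKeys (fun _ => List.replicate len.toNat '0') ids
    have hrows0row : ∀ k ∈ ids,
        (ids.foldl (fun (a : PySem.Dict Int (List Char)) n =>
          a.insert n (List.replicate len.toNat '0')) ⟨[]⟩).getD k [] = pvRow len [] k := by
      intro k hk
      rw [PySem.Dict.getD_eq_get?_getD,
        pvGetFoldlInsertFn (fun _ => List.replicate len.toNat '0') ids ⟨[]⟩ k, if_pos hk,
        pvRowNil]
      rfl
    obtain ⟨hkeys, hrow⟩ := pvScatterInv ids len nodes [] _ hrows0keys hrows0row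
    have hnodup : (nodes.foldl (pvStep ids len)
        (ids.foldl (fun (a : PySem.Dict Int (List Char)) n =>
          a.insert n (List.replicate len.toNat '0')) ⟨[]⟩)).keys.Nodup := by
      rw [hkeys]; exact pvUpdateNodup ids
    rw [PySem.Dict.items_eq_map_keys _ hnodup [], hkeys, List.map_map]
    apply List.map_congr_left
    intro k hk
    simp only [Function.comp]
    rw [hrow k (pvMemUpdate.mp hk)]
    simp
  rw [hA, hB]

-- ===== VERDICT (by name: the statement is the Claim_ definition above) =====
theorem get_node_encoding_spec : Claim_equal_get_node_encoding := by
  intro ids_no_ego nodes_no_ego length_ETNS _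
  unfold Spec_get_node_encoding
  exact pvMain ids_no_ego nodes_no_ego length_ETNS
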